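-- pv_equiv track=rewrite | github.com/utkudmir/cue | scripts/resolve-ios-simulator.py | resolve_runtime_id
-- ===== SOURCE A (Python) =====
-- def resolve_runtime_id(runtime_hint: str, runtimes: list[dict]) -> str:
--     if runtime_hint:
--         for runtime in runtimes:
--             if runtime_hint == runtime.get("identifier"):
--                 return runtime_hint
--         lowered = runtime_hint.lower()
--         for runtime in runtimes:
--             if lowered == str(runtime.get("name", "")).lower():
--                 return str(runtime.get("identifier", ""))
--     if runtimes:
--         return str(runtimes[0].get("identifier", ""))
--     return ""
-- ===== SOURCE B (Python) =====
-- def resolve_runtime_id(runtime_hint: str, runtimes: list[dict]) -> str: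
--     if runtime_hint:
--         lowered = runtime_hint.lower()
--         name_match = None
--         for runtime in runtimes:
--             if runtime_hint == runtime.get("identifier"):
--                 return runtime_hint
--             if name_match is None and lowered == str(runtime.get("name", "")).lower():
--                 name_match = str(runtime.get("identifier", ""))
--         if name_match is not None:
--             return name_match
--     return str(runtimes[0].get("identifier", "")) if runtimes else ""
-- ===== Notes on version B (the rewrite author's own statement) =====
-- stated objective: alternative
-- what changed: A's two sequential scans (one for an identifier match, then one for a case-insensitive name match) are fused into a single pass that returns on an identifier match and only records the first name match, applied after the loop.
import Mathlib
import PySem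

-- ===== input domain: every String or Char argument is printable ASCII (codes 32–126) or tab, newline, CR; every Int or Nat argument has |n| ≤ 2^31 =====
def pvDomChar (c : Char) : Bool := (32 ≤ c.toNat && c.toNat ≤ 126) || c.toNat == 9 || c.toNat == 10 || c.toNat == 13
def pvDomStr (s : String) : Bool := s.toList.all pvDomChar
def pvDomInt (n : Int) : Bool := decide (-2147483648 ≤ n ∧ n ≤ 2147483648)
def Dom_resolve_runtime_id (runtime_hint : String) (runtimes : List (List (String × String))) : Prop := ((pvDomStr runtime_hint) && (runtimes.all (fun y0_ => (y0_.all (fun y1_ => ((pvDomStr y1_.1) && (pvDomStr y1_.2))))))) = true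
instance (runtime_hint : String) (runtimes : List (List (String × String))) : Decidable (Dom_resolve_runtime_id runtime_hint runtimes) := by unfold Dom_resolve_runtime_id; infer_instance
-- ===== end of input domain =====

-- B fuses A's two sequential scans into one pass (return on identifier match, record first name match); alternative decomposition, same asymptotic cost. Dicts are association lists; lookup = first match.
-- dict.get(k) / dict.get(k, "") on an association list (first match)
def pvLookup? (r : List (String × String)) (k : String) : Option String :=
  match r with
  | [] => none
  | (k', v) :: rest => if k' = k then some v else pvLookup? rest k

def pvLookupD (r : List (String × String)) (k : String) : String :=
  (pvLookup? r k).getD ""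

-- ===== PORT A =====
-- first loop of A: return runtime_hint on an exact identifier match
def pvA_scan1 (hint : String) (rts : List (List (String × String))) : Option String :=
  match rts with
  | [] => none
  | r :: rest => if pvLookup? r "identifier" = some hint then some hint else pvA_scan1 hint rest

-- second loop of A: case-insensitive name match, return that runtime's identifier
def pvA_scan2 (lowered : String) (rts : List (List (String × String))) : Option String :=
  match rts with
  | [] => none
  | r :: rest =>
      if PySem.Str.lower (pvLookupD r "name") = lowered then some (pvLookupD r "identifier")
      else pvA_scan2 lowered rest

def resolve_runtime_id (runtime_hint : String) (runtimes : List (List (String × String))) : String :=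
  let fallback := match runtimes with
    | [] => ""
    | r :: _ => pvLookupD r "identifier"
  if runtime_hint ≠ "" then
    match pvA_scan1 runtime_hint runtimes with
    | some s => s
    | none =>
        match pvA_scan2 (PySem.Str.lower runtime_hint) runtimes with
        | some s => s
        | none => fallback
  else fallback

-- ===== PORT B =====
-- single loop of B: return hint on identifier match, else carry the first name match in acc
def pvB_loop (hint lowered : String) (acc : Option String) (rts : List (List (String × String))) : Option String :=
  match rts with
  | [] => acc
  | r :: rest =>
      if pvLookup? r "identifier" = some hint then some hint
      else
        pvB_loop hint lowered
          (if acc = none ∧ PySem.Str.lower (pvLookupD r "name") = lowered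
           then some (pvLookupD r "identifier") else acc) rest

def resolve_runtime_id_alt (runtime_hint : String) (runtimes : List (List (String × String))) : String :=
  let res := if runtime_hint ≠ "" then
      pvB_loop runtime_hint (PySem.Str.lower runtime_hint) none runtimes
    else none
  match res with
  | some s => s
  | none => match runtimes with
    | [] => ""
    | r :: _ => pvLookupD r "identifier"

-- ===== PRECONDITION & SPEC =====
def Spec_resolve_runtime_id (runtime_hint : String) (runtimes : List (List (String × String))) (out : String) : Prop := out = resolve_runtime_id_alt runtime_hint runtimes
instance (runtime_hint : String) (runtimes : List (List (String × String))) (out : String) : Decidable (Spec_resolve_runtime_id runtime_hint runtimes out) := by unfold Spec_resolve_runtime_id; infer_instance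

-- ===== CLAIM (what is proved, stated in full; the proofs are below) =====
def Claim_equal_resolve_runtime_id : Prop := ∀ (runtime_hint : String) (runtimes : List (List (String × String))), Dom_resolve_runtime_id runtime_hint runtimes → Spec_resolve_runtime_id runtime_hint runtimes (resolve_runtime_id runtime_hint runtimes)

-- ===== LEMMAS AND PROOFS =====
-- The fused loop equals: identifier scan first; if it misses, the accumulator (first name match seen so far) falls back to the name scan.
theorem pvB_loop_eq (hint lowered : String) (rts : List (List (String × String))) :
    ∀ acc : Option String,
      pvB_loop hint lowered acc rts =
        match pvA_scan1 hint rts with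
        | some s => some s
        | none => acc.orElse (fun _ => pvA_scan2 lowered rts) := by
  induction rts with
  | nil => intro acc; cases acc <;> simp [pvB_loop, pvA_scan1, pvA_scan2, Option.orElse]
  | cons r rest ih =>
    intro acc
    simp only [pvB_loop, pvA_scan1, pvA_scan2]
    by_cases h1 : pvLookup? r "identifier" = some hint
    · simp [h1]
    · simp only [h1, if_false, ih]
      by_cases h2 : PySem.Str.lower (pvLookupD r "name") = lowered
      · cases acc <;> simp [h2, Option.orElse]
      · cases acc <;> simp [h2, Option.orElse]

-- ===== VERDICT (by name: the statement is the Claim_ definition above) =====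
theorem resolve_runtime_id_spec : Claim_equal_resolve_runtime_id := by
  intro hint rts _
  unfold Spec_resolve_runtime_id resolve_runtime_id resolve_runtime_id_alt
  by_cases hh : hint ≠ ""
  · simp only [hh, pvB_loop_eq]
    cases h1 : pvA_scan1 hint rts with
    | some s => simp [hh]
    | none =>
      cases h2 : pvA_scan2 (PySem.Str.lower hint) rts with
      | some s => simp [hh, Option.orElse]
      | none => cases rts <;> simp [hh, Option.orElse]
  · simp [hh]
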